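-- pv_equiv track=rewrite | github.com/qcif/httpie-oauth1 | httpie_oauth1.py | _extract_attribute
-- ===== SOURCE A (Python) =====
-- def _extract_attribute(data, desired_attribute):
--     """
--     Extract a named parameter from the preamble text.
--
--     Lines are recognised as parameters if they are formatted as
--     "name:value". Whitespace around the name and value are ignored.
--     Values can be single or double quoted. Single and double quotes inside
--     quoted values can be escaped with a backslash.
--
--     :param data: preamble text to search
--     :param desired_attribute: name of attribute to extract
--     :return: value, or None if not found
--     """
--
--     for line in data.splitlines():
--         colon_pos = line.find(':')
--         if colon_pos != -1:
--             name = line[:colon_pos].strip()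
--
--             value = line[colon_pos + 1:].strip()
--             if value.startswith('"') and value.endswith('"') or \
--                value.startswith("'") and value.endswith("'"):
--                 value = value[1:len(value) - 1]
--                 value = value.replace('\\"', '"')
--                 value = value.replace("\\'", "'")
--
--             if name == desired_attribute:
--                 return value  # found
--
--     return None  # not found
-- ===== SOURCE B (Python) =====
-- def _unquote(value):
--     if value.startswith('"') and value.endswith('"') or \
--        value.startswith("'") and value.endswith("'"):
--         value = value[1:len(value) - 1]
--         value = value.replace('\\"', '"')
--         value = value.replace("\\'", "'")
--     return value
--
--
-- def _extract_attribute(data, desired_attribute):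
--     # Build the full name -> value table by walking the lines BACK TO FRONT
--     # (a later overwrite is an earlier line, so the first occurrence wins),
--     # then answer with a single dict lookup.
--     attrs = {}
--     for line in reversed(data.splitlines()):
--         colon_pos = line.find(':')
--         if colon_pos != -1:
--             attrs[line[:colon_pos].strip()] = _unquote(line[colon_pos + 1:].strip())
--     return attrs.get(desired_attribute)
-- ===== Notes on version B (the rewrite author's own statement) =====
-- stated objective: alternative
-- what changed: Scan-with-early-return is replaced by building the complete attribute table in one reversed-order pass (overwrite = earlier line wins) followed by a single dict lookup, with the unquoting factored into a helper.
import Mathlib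
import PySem

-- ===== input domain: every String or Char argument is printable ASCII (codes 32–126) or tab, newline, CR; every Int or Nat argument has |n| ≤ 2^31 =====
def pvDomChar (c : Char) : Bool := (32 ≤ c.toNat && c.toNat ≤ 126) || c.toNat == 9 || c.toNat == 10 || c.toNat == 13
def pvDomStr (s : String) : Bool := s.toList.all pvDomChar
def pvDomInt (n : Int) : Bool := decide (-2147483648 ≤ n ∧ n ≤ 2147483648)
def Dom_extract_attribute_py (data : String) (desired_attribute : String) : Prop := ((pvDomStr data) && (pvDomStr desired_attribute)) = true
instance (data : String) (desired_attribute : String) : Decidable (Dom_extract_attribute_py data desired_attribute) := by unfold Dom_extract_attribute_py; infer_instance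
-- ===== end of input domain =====

-- B replaces A's scan-with-early-return by a reversed-order build of the full
-- attribute dict followed by one lookup (objective: alternative decomposition).


-- ===== PORT A =====
-- A: scan the lines front to back, return at the first line whose name matches.
def extract_attribute_py_go (desired_attribute : String) : List String → Option String
  | [] => none
  | line :: rest =>
    let colon_pos := PySem.Str.find line ":"
    if colon_pos ≠ -1 then
      let name := PySem.Str.strip (PySem.Str.slice line none (some colon_pos))
      let value := PySem.Str.strip (PySem.Str.slice line (some (colon_pos + 1)) none)
      let value :=
        if (PySem.Str.startswith value "\"" && PySem.Str.endswith value "\"") ||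
           (PySem.Str.startswith value "'" && PySem.Str.endswith value "'") then
          PySem.Str.replace
            (PySem.Str.replace
              (PySem.Str.slice value (some 1) (some (PySem.Str.len value - 1)))
              "\\\"" "\"")
            "\\'" "'"
        else value
      if name = desired_attribute then some value
      else extract_attribute_py_go desired_attribute rest
    else extract_attribute_py_go desired_attribute rest

def extract_attribute_py (data : String) (desired_attribute : String) : Option String :=
  extract_attribute_py_go desired_attribute (PySem.Str.splitlines data)

-- ===== PORT B =====
-- B helper: unquote a stripped value (port of _unquote in Source B).
def pvUnquote (value : String) : String :=
  if (PySem.Str.startswith value "\"" && PySem.Str.endswith value "\"") ||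
     (PySem.Str.startswith value "'" && PySem.Str.endswith value "'") then
    PySem.Str.replace
      (PySem.Str.replace
        (PySem.Str.slice value (some 1) (some (PySem.Str.len value - 1)))
        "\\\"" "\"")
      "\\'" "'"
  else value

-- B loop body: record one line's attribute into the table (overwrite on repeat).
def pvRecordLine (d : PySem.Dict String String) (line : String) : PySem.Dict String String :=
  let colon_pos := PySem.Str.find line ":"
  if colon_pos ≠ -1 then
    d.insert (PySem.Str.strip (PySem.Str.slice line none (some colon_pos)))
             (pvUnquote (PySem.Str.strip (PySem.Str.slice line (some (colon_pos + 1)) none)))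
  else d

def extract_attribute_py_alt (data : String) (desired_attribute : String) : Option String :=
  (((PySem.Str.splitlines data).reverse.foldl pvRecordLine PySem.Dict.empty).get?
    desired_attribute)

-- ===== PRECONDITION & SPEC =====
def Spec_extract_attribute_py (data : String) (desired_attribute : String) (out : Option String) : Prop := out = extract_attribute_py_alt data desired_attribute
instance (data : String) (desired_attribute : String) (out : Option String) : Decidable (Spec_extract_attribute_py data desired_attribute out) := by unfold Spec_extract_attribute_py; infer_instance

-- ===== CLAIM (what is proved, stated in full; the proofs are below) =====
def Claim_equal_extract_attribute_py : Prop := ∀ (data : String) (desired_attribute : String), Dom_extract_attribute_py data desired_attribute → Spec_extract_attribute_py data desired_attribute (extract_attribute_py data desired_attribute)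

-- ===== LEMMAS AND PROOFS =====

-- Folding B's step over the reversed lines from any dict d, then looking up k,
-- yields A's first-match scan result, falling back to d's entry for k.
theorem pvFold_get (k : String) (ls : List String) (d : PySem.Dict String String) :
    (ls.reverse.foldl pvRecordLine d).get? k =
      (extract_attribute_py_go k ls).or (d.get? k) := by
  induction ls generalizing d with
  | nil => simp [extract_attribute_py_go]
  | cons line rest ih =>
    rw [List.reverse_cons, List.foldl_append]
    simp only [List.foldl_cons, List.foldl_nil]
    show (pvRecordLine (rest.reverse.foldl pvRecordLine d) line).get? k = _
    unfold pvRecordLine extract_attribute_py_go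
    by_cases hc : PySem.Str.find line ":" ≠ -1
    · rw [if_pos hc, if_pos hc]
      by_cases hn : PySem.Str.strip (PySem.Str.slice line none (some (PySem.Str.find line ":"))) = k
      · rw [hn, PySem.Dict.get?_insert_self, if_pos rfl]
        simp [pvUnquote]
      · rw [PySem.Dict.get?_insert_of_ne _ _ (fun h => hn h.symm), if_neg hn]
        exact ih d
    · rw [if_neg hc, if_neg hc]
      exact ih d

-- ===== VERDICT (by name: the statement is the Claim_ definition above) =====
theorem extract_attribute_py_spec : Claim_equal_extract_attribute_py := by
  intro data desired_attribute _
  show extract_attribute_py data desired_attribute = extract_attribute_py_alt data desired_attribute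
  unfold extract_attribute_py extract_attribute_py_alt
  rw [pvFold_get]
  cases extract_attribute_py_go desired_attribute (PySem.Str.splitlines data) <;>
    simp [PySem.Dict.empty, PySem.Dict.get?]
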